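-- pv_equiv track=rewrite | github.com/SrFlipFlop/DroidScripts | smali2human.py | method_content
-- ===== SOURCE A (Python) =====
-- def method_content(name, content):
-- 	#TODO: do the same with a regex
-- 	method_content = []
-- 	method = False
-- 	for line in content.split('\n'):
-- 		if name in line:
-- 			method = True
-- 			method_content.append(line)
-- 		elif method:
-- 			method_content.append(line)
-- 		elif '.end method' in line and method:
-- 			method_content.append(line)
-- 			return method_content
-- 	return method_content
-- ===== SOURCE B (Python) =====
-- def method_content(name, content):
--     lines = content.split('\n')
--     for i, line in enumerate(lines):
--         if name in line:
--             return lines[i:]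
--     return []
-- ===== Notes on version B (the rewrite author's own statement) =====
-- stated objective: simpler
-- what changed: Replaces the flag-driven per-line accumulation (and the unreachable '.end method' branch) with find-first-matching-line-then-slice: locate the first line containing name and return lines[i:].
import Mathlib
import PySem

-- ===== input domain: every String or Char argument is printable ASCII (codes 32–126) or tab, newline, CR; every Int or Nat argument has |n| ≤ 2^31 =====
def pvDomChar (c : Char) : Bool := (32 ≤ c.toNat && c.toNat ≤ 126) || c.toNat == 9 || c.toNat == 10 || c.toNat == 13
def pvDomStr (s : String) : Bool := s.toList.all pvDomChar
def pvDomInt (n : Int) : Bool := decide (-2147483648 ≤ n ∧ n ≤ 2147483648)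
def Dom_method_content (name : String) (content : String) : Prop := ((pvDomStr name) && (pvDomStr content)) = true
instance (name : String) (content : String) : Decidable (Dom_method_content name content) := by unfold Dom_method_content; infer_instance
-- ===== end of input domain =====

-- B replaces A's flag-driven accumulation with find-first-matching-line-then-slice (simpler decomposition).

-- ===== PORT A =====
-- literal transliteration of A's loop: state = (accumulated lines, method flag), early return on the third branch
def methodContentLoopA (name : String) : List String → List String → Bool → List String
  | [], acc, _ => acc
  | l :: rest, acc, method =>
    if PySem.Str.isIn name l then
      methodContentLoopA name rest (acc ++ [l]) true
    else if method then
      methodContentLoopA name rest (acc ++ [l]) method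
    else if PySem.Str.isIn ".end method" l && method then
      acc ++ [l]
    else
      methodContentLoopA name rest acc method

def method_content (name : String) (content : String) : List String :=
  methodContentLoopA name ((PySem.Str.split? content "\n").getD []) [] false

-- ===== PORT B =====
def method_content_alt (name : String) (content : String) : List String :=
  let lines := (PySem.Str.split? content "\n").getD []
  match lines.findIdx? (fun l => PySem.Str.isIn name l) with
  | some i => lines.drop i
  | none => []

-- ===== PRECONDITION & SPEC =====
def Spec_method_content (name : String) (content : String) (out : List String) : Prop := out = method_content_alt name content
instance (name : String) (content : String) (out : List String) : Decidable (Spec_method_content name content out) := by unfold Spec_method_content; infer_instance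

-- ===== CLAIM (what is proved, stated in full; the proofs are below) =====
def Claim_equal_method_content : Prop := ∀ (name : String) (content : String), Dom_method_content name content → Spec_method_content name content (method_content name content)

-- ===== LEMMAS AND PROOFS =====

-- once the flag is set, A appends every remaining line
theorem loopA_true (name : String) (ls acc : List String) :
    methodContentLoopA name ls acc true = acc ++ ls := by
  induction ls generalizing acc with
  | nil => simp [methodContentLoopA]
  | cons l rest ih =>
    simp only [methodContentLoopA]
    by_cases h : PySem.Str.isIn name l
    · simp [ih]
    · simp only [h, Bool.false_eq_true, if_false, if_true, ih]
      simp

-- before the flag is set, A's result is the suffix from the first matching line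
theorem loopA_false (name : String) (ls acc : List String) :
    methodContentLoopA name ls acc false =
      acc ++ (match ls.findIdx? (fun l => PySem.Str.isIn name l) with
              | some i => ls.drop i
              | none => []) := by
  induction ls generalizing acc with
  | nil => simp [methodContentLoopA]
  | cons l rest ih =>
    simp only [methodContentLoopA, List.findIdx?_cons]
    by_cases h : PySem.Str.isIn name l
    · rw [if_pos h, if_pos h, loopA_true]
      simp
    · rw [if_neg h, if_neg (by simpa using h), if_neg (by simp), ih,
        if_neg (by simpa using h)]
      cases hf : rest.findIdx? (fun l => PySem.Str.isIn name l) with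
      | none => simp
      | some i => simp

-- ===== VERDICT (by name: the statement is the Claim_ definition above) =====
theorem method_content_spec : Claim_equal_method_content := by
  intro name content _
  unfold Spec_method_content method_content method_content_alt
  exact loopA_false name ((PySem.Str.split? content "\n").getD []) []
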